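-- pv_equiv track=rewrite | github.com/kmeranda/disfluency_remover | disfluency_remover.py | get_tprime
-- ===== SOURCE A (Python) =====
-- def get_tprime(n, tags, all_tags):
-- 	# base case
-- 	if n == 1:
-- 		return all_tags
-- 	# go another level
-- 	new_t = []
-- 	for tp in all_tags:
-- 		for t in tags:
-- 			new_t.append(tp+' '+t)
-- 	# recurse
-- 	return get_tprime(n-1, tags, new_t)
-- ===== SOURCE B (Python) =====
-- def get_tprime(n, tags, all_tags):
-- 	# iterative instead of recursive: repeat the product step n-1 times
-- 	result = all_tags
-- 	for _ in range(n - 1):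
-- 		result = [tp + ' ' + t for tp in result for t in tags]
-- 	return result
-- ===== Notes on version B (the rewrite author's own statement) =====
-- stated objective: simpler
-- what changed: Replaces the self-recursion over n with an iterative for-range loop that rebuilds the list with a comprehension n-1 times; no recursion, no recursion-limit exposure.
import Mathlib
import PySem

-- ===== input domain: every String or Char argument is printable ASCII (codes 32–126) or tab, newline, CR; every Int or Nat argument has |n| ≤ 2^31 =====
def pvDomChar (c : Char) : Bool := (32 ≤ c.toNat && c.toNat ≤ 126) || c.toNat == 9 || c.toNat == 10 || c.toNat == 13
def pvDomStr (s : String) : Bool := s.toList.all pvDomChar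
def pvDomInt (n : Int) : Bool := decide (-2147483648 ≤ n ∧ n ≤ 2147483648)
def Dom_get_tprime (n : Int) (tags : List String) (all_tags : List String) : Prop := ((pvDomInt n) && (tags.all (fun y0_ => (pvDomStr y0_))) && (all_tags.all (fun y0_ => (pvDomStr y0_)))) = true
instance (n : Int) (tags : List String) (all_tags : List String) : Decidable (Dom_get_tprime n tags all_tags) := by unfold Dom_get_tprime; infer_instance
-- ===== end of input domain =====

-- B replaces A's self-recursion over n with an iterative range loop doing the same product step; objective: simpler.


-- ===== PORT A =====
-- Python tests 'n == 1'; for n < 1 the Python recurses without bound (RecursionError), which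
-- Pre_get_tprime excludes, so the '≤' guard only makes the same computation total.
def get_tprime (n : Int) (tags : List String) (all_tags : List String) : List String :=
  if n ≤ 1 then all_tags
  else
    let new_t := all_tags.foldl (fun acc tp => tags.foldl (fun acc2 t => acc2 ++ [tp ++ " " ++ t]) acc) []
    get_tprime (n - 1) tags new_t
termination_by (n - 1).toNat
decreasing_by omega

-- ===== PORT B =====
def get_tprime_alt (n : Int) (tags : List String) (all_tags : List String) : List String :=
  (PySem.List.pyRange 0 (n - 1) 1).foldl
    (fun result _ => result.flatMap (fun tp => tags.map (fun t => tp ++ " " ++ t))) all_tags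

-- ===== PRECONDITION & SPEC =====
-- Pre_ excludes n < 1, on which Python A recurses without bound and raises RecursionError.
def Pre_get_tprime (n : Int) (tags : List String) (all_tags : List String) : Prop := 1 ≤ n
instance (n : Int) (tags : List String) (all_tags : List String) : Decidable (Pre_get_tprime n tags all_tags) := by unfold Pre_get_tprime; infer_instance
def pvWitness_get_tprime : Int × List String × List String := (2, ["N", "V"], ["N", "V"])
def Spec_get_tprime (n : Int) (tags : List String) (all_tags : List String) (out : List String) : Prop := out = get_tprime_alt n tags all_tags
instance (n : Int) (tags : List String) (all_tags : List String) (out : List String) : Decidable (Spec_get_tprime n tags all_tags out) := by unfold Spec_get_tprime; infer_instance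

-- ===== CLAIM (what is proved, stated in full; the proofs are below) =====
def Claim_equal_get_tprime : Prop := ∀ (n : Int) (tags : List String) (all_tags : List String), Dom_get_tprime n tags all_tags → Pre_get_tprime n tags all_tags → Spec_get_tprime n tags all_tags (get_tprime n tags all_tags)

-- ===== LEMMAS AND PROOFS =====

-- the product step both programs perform once per level
def tpStep (tags : List String) (res : List String) : List String :=
  res.flatMap (fun tp => tags.map (fun t => tp ++ " " ++ t))

lemma tpStep_eq_body (tags all_tags : List String) :
    all_tags.foldl (fun acc tp => tags.foldl (fun acc2 t => acc2 ++ [tp ++ " " ++ t]) acc) []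
      = tpStep tags all_tags := by
  unfold tpStep
  simp only [PySem.List.foldl_append_singleton_eq_map]
  rw [PySem.List.foldl_append_eq_flatMap]
  simp

lemma foldl_const_iterate {α β : Type} (f : α → α) (l : List β) (v : α) :
    l.foldl (fun r _ => f r) v = f^[l.length] v := by
  induction l generalizing v with
  | nil => rfl
  | cons x xs ih => simp [List.foldl, ih, Function.iterate_succ_apply]

lemma get_tprime_iter (k : Nat) (tags all_tags : List String) :
    get_tprime (1 + k) tags all_tags = (tpStep tags)^[k] all_tags := by
  induction k generalizing all_tags with
  | zero => simp [get_tprime]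
  | succ k ih =>
    rw [get_tprime]
    have h1 : ¬ ((1 : Int) + (k + 1) ≤ 1) := by omega
    have h2 : (1 : Int) + ((k : Int) + 1) - 1 = 1 + k := by ring
    simp only [h1, if_false, h2, Int.natCast_succ] at *
    rw [tpStep_eq_body, ih, Function.iterate_succ_apply]

lemma get_tprime_alt_iter (n : Int) (tags all_tags : List String) :
    get_tprime_alt n tags all_tags = (tpStep tags)^[(n - 1).toNat] all_tags := by
  unfold get_tprime_alt
  have : (fun (result : List String) (_ : Int) => result.flatMap (fun tp => tags.map (fun t => tp ++ " " ++ t)))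
       = fun result _ => tpStep tags result := rfl
  rw [this, foldl_const_iterate, PySem.List.length_pyRange_one]
  norm_num

-- ===== VERDICT (by name: the statement is the Claim_ definition above) =====
theorem get_tprime_spec : Claim_equal_get_tprime := by
  intro n tags all_tags _ hpre
  unfold Spec_get_tprime
  have hn : n = 1 + ((n - 1).toNat : Int) := by
    unfold Pre_get_tprime at hpre; omega
  rw [hn, get_tprime_iter, get_tprime_alt_iter]
  congr 1
  omega
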